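-- pv_equiv track=rewrite | github.com/JunJon09/Boat_race | myproject/test.py | ranck_check
-- ===== SOURCE A (Python) =====
-- def ranck_check(predict, real):
--     #1ならあたり['3連単', '三連複', '二連単', '二連複', '拡張(これは実装しない)', '単勝', '複勝']
--     #[2,1,3,[1,2], 'stage', 'race']
--     #3連単
--     all_result = []
--     for (predict_rank, real_rank) in zip(predict, real):
--
--         result = []
--         if predict_rank[0] == real_rank[0] and predict_rank[1] == real_rank[1] and predict_rank[2] == real_rank[2]:
--             result.append(1)
--         else:
--             result.append(0)
--
--         #三連複
--         count = 0
--         for i,p in enumerate(predict_rank):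
--             for j, r in enumerate(real_rank):
--                 if i<=2 and j<=2:
--                     if p == r:
--                         count += 1
--
--         if count == 3:
--             result.append(1)
--         else:
--             result.append(0)
--
--         #二連単
--         if (predict_rank[0] == real_rank[0]) and (predict_rank[1] == real_rank[1]):
--             result.append(1)
--         else:
--             result.append(0)
--         #二連複
--         count = 0
--         for i,p in enumerate(predict_rank):
--             for j,r in enumerate(real_rank):
--                 if i<=1 and j<=1:
--                     if p == r:
--                         count += 1
--         if count == 2:
--             result.append(1)
--         else:
--             result.append(0)
--
--         #拡張
--         result.append(0)
--
--         #単勝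
--         if predict_rank[0] == real_rank [0]:
--             result.append(1)
--         else:
--             result.append(0)
--
--         #複勝
--         count = 0
--         for i, r in enumerate(real_rank):
--             if i<=1:
--                 if r == predict_rank[0]:
--                     count += 1
--
--         if count == 1:
--             result.append(1)
--         else:
--             result.append(1)
--         all_result.append(result)
--     return all_result
-- ===== SOURCE B (Python) =====
-- def _pair_count(p, r):
--     # frequency tables instead of A's nested index loops
--     pc = {}
--     for v in p:
--         pc[v] = pc.get(v, 0) + 1
--     rc = {}
--     for v in r:
--         rc[v] = rc.get(v, 0) + 1
--     return sum(c * rc.get(v, 0) for v, c in pc.items())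
--
--
-- def ranck_check(predict, real):
--     all_result = []
--     for predict_rank, real_rank in zip(predict, real):
--         p1, r1 = predict_rank[:1], real_rank[:1]
--         p2, r2 = predict_rank[:2], real_rank[:2]
--         p3, r3 = predict_rank[:3], real_rank[:3]
--         all_result.append([
--             1 if p3 == r3 else 0,                    # 三連単
--             1 if _pair_count(p3, r3) == 3 else 0,    # 三連複
--             1 if p2 == r2 else 0,                    # 二連単
--             1 if _pair_count(p2, r2) == 2 else 0,    # 二連複
--             0,                                       # 拡張
--             1 if p1 == r1 else 0,                    # 単勝
--             1,                                       # 複勝 (A appends 1 in both branches)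
--         ])
--     return all_result
-- ===== Notes on version B (the rewrite author's own statement) =====
-- stated objective: faster
-- what changed: The nested enumerate double-loops for the box bets are replaced by frequency tables (dict counters) combined with a sum of count products, and the index-chain equality tests become prefix-slice comparisons, giving one linear pass per row instead of a quadratic pairwise scan.
import Mathlib
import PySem

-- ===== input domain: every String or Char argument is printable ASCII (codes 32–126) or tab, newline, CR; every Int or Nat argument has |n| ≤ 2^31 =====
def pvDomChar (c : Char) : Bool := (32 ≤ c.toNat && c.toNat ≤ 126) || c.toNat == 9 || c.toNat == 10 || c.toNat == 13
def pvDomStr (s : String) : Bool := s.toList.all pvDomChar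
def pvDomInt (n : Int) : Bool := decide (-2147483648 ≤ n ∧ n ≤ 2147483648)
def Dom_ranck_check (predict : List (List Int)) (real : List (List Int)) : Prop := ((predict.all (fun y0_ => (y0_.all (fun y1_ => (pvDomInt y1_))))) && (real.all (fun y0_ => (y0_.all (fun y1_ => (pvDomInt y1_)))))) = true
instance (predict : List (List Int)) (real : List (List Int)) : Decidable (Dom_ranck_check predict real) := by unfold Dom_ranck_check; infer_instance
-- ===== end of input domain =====

-- B replaces A's nested enumerate double-loops by per-row frequency tables combined with a sum of
-- count products, and A's index chains by prefix-slice comparisons.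

-- ===== PORT A =====
-- A's nested 'for i,p in enumerate(...): for j,r in enumerate(...)' counting loop (condition 'i<=k and j<=k')
def pvCountA (k : Int) (p r : List Int) : Int :=
  (PySem.List.enumerate p).foldl (fun c ip =>
    (PySem.List.enumerate r).foldl (fun c jr =>
      if ip.1 ≤ k ∧ jr.1 ≤ k then (if ip.2 = jr.2 then c + 1 else c) else c) c) 0

-- one iteration of A's 'for (predict_rank, real_rank) in zip(...)' body (result appended in order)
def pvRowA (p r : List Int) : List Int :=
  let e3 : Int := if PySem.List.pyGetD p 0 0 = PySem.List.pyGetD r 0 0 ∧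
                     PySem.List.pyGetD p 1 0 = PySem.List.pyGetD r 1 0 ∧
                     PySem.List.pyGetD p 2 0 = PySem.List.pyGetD r 2 0 then 1 else 0
  let b3 : Int := if pvCountA 2 p r = 3 then 1 else 0
  let e2 : Int := if PySem.List.pyGetD p 0 0 = PySem.List.pyGetD r 0 0 ∧
                     PySem.List.pyGetD p 1 0 = PySem.List.pyGetD r 1 0 then 1 else 0
  let b2 : Int := if pvCountA 1 p r = 2 then 1 else 0
  let win : Int := if PySem.List.pyGetD p 0 0 = PySem.List.pyGetD r 0 0 then 1 else 0
  let cf : Int := (PySem.List.enumerate r).foldl (fun c jr =>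
      if jr.1 ≤ 1 then (if jr.2 = PySem.List.pyGetD p 0 0 then c + 1 else c) else c) 0
  let fk : Int := if cf = 1 then 1 else 1
  [e3, b3, e2, b2, 0, win, fk]

def ranck_check (predict : List (List Int)) (real : List (List Int)) : List (List Int) :=
  (predict.zip real).map (fun pr => pvRowA pr.1 pr.2)

-- ===== PORT B =====
-- B's 'pc = {}; for v in p: pc[v] = pc.get(v, 0) + 1' frequency table
def pvCounterB (xs : List Int) : PySem.Dict Int Int :=
  xs.foldl (fun d v => d.insert v (d.getD v 0 + 1)) PySem.Dict.empty

-- B's _pair_count: 'sum(c * rc.get(v, 0) for v, c in pc.items())'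
def pvPairCount (p r : List Int) : Int :=
  let pc := pvCounterB p
  let rc := pvCounterB r
  (pc.items.map (fun vc => vc.2 * rc.getD vc.1 0)).sum

def pvRowB (p r : List Int) : List Int :=
  let p1 := PySem.List.slice p none (some 1)
  let r1 := PySem.List.slice r none (some 1)
  let p2 := PySem.List.slice p none (some 2)
  let r2 := PySem.List.slice r none (some 2)
  let p3 := PySem.List.slice p none (some 3)
  let r3 := PySem.List.slice r none (some 3)
  [if p3 = r3 then 1 else 0,
   if pvPairCount p3 r3 = 3 then 1 else 0,
   if p2 = r2 then 1 else 0,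
   if pvPairCount p2 r2 = 2 then 1 else 0,
   0,
   if p1 = r1 then 1 else 0,
   1]

def ranck_check_alt (predict : List (List Int)) (real : List (List Int)) : List (List Int) :=
  (predict.zip real).map (fun pr => pvRowB pr.1 pr.2)

-- ===== PRECONDITION & SPEC =====
-- A indexes row[0], then (only when the heads agree) row[1], then (when the first two positions agree)
-- row[2]; pvRowOK says exactly that this index chain stays in range on both rows, so Pre_ admits
-- exactly the inputs on which the Python A returns normally (outside it A raises IndexError).
def pvRowOK (p r : List Int) : Bool :=
  !p.isEmpty && !r.isEmpty &&
  (p.getD 0 0 != r.getD 0 0 ||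
    (decide (2 ≤ p.length) && decide (2 ≤ r.length) &&
      (p.getD 1 0 != r.getD 1 0 || (decide (3 ≤ p.length) && decide (3 ≤ r.length)))))

def Pre_ranck_check (predict : List (List Int)) (real : List (List Int)) : Prop :=
  ∀ pr ∈ predict.zip real, pvRowOK pr.1 pr.2 = true

instance (predict : List (List Int)) (real : List (List Int)) : Decidable (Pre_ranck_check predict real) := by
  unfold Pre_ranck_check; infer_instance

def pvWitness_ranck_check : List (List Int) × List (List Int) :=
  ([[1, 2, 3], [2, 1, 3]], [[1, 3, 2], [2, 1, 3]])

def Spec_ranck_check (predict : List (List Int)) (real : List (List Int)) (out : List (List Int)) : Prop := out = ranck_check_alt predict real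
instance (predict : List (List Int)) (real : List (List Int)) (out : List (List Int)) : Decidable (Spec_ranck_check predict real out) := by unfold Spec_ranck_check; infer_instance

-- ===== CLAIM (what is proved, stated in full; the proofs are below) =====
def Claim_equal_ranck_check : Prop := ∀ (predict : List (List Int)) (real : List (List Int)), Dom_ranck_check predict real → Pre_ranck_check predict real → Spec_ranck_check predict real (ranck_check predict real)

-- ===== LEMMAS AND PROOFS =====

-- A's inner loop over 'enumerate(real_rank)' with condition (Q ∧ j ≤ K) counts, when Q holds, the
-- matches of pv among the first (K - s + 1) elements.
lemma pv_innerA (Q : Prop) [Decidable Q] (pv K : Int) (r : List Int) : ∀ (s c : Int),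
    (PySem.List.enumerate r s).foldl
      (fun c jr => if Q ∧ jr.1 ≤ K then (if pv = jr.2 then c + 1 else c) else c) c
    = c + if Q then (((r.take (K - s + 1).toNat).countP (fun rv => pv == rv) : Nat) : Int) else 0 := by
  induction r with
  | nil => intro s c; simp [PySem.List.enumerate_nil]
  | cons x t ih =>
    intro s c
    rw [PySem.List.enumerate_cons, List.foldl_cons, ih (s + 1)]
    by_cases hQ : Q
    · by_cases hs : s ≤ K
      · have h1 : (K - s + 1).toNat = (K - (s + 1) + 1).toNat + 1 := by omega
        rw [h1, List.take_succ_cons, List.countP_cons]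
        by_cases hx : pv = x
        · simp [hQ, hs, hx]; ring
        · simp [hQ, hs, hx]
      · have h1 : (K - s + 1).toNat = 0 := by omega
        have h2 : (K - (s + 1) + 1).toNat = 0 := by omega
        simp [hQ, hs, h1, h2]
    · simp [hQ]

-- A's whole double loop is the flat sum of those per-element match counts
lemma pv_countA_eq (K : Int) (p r : List Int) : ∀ (s c : Int),
    (PySem.List.enumerate p s).foldl
      (fun c ip => (PySem.List.enumerate r).foldl
        (fun c jr => if ip.1 ≤ K ∧ jr.1 ≤ K then (if ip.2 = jr.2 then c + 1 else c) else c) c) c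
    = c + ((p.take (K - s + 1).toNat).map
        (fun pv => (((r.take (K + 1).toNat).countP (fun rv => pv == rv) : Nat) : Int))).sum := by
  induction p with
  | nil => intro s c; simp [PySem.List.enumerate_nil]
  | cons x t ih =>
    intro s c
    rw [PySem.List.enumerate_cons, List.foldl_cons, ih (s + 1)]
    rw [pv_innerA (s ≤ K) x K r 0 c]
    by_cases hs : s ≤ K
    · have h1 : (K - s + 1).toNat = (K - (s + 1) + 1).toNat + 1 := by omega
      have h0 : K - 0 + 1 = K + 1 := by ring
      rw [h1, List.take_succ_cons, List.map_cons, List.sum_cons, h0]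
      simp [hs]; ring
    · have h1 : (K - s + 1).toNat = 0 := by omega
      have h2 : (K - (s + 1) + 1).toNat = 0 := by omega
      simp [hs, h1, h2]

-- the flat pair-count sum, regrouped as a sum over distinct values
lemma pv_sum_counts (b : List Int) : ∀ (a : List Int),
    (a.map (fun pv => ((b.count pv : Nat) : Int))).sum
    = ∑ k ∈ a.toFinset, ((a.count k : Nat) : Int) * ((b.count k : Nat) : Int) := by
  intro a
  induction a with
  | nil => simp
  | cons x t ih =>
    rw [List.map_cons, List.sum_cons, ih, List.toFinset_cons]
    have hcnt : ∀ k : Int, (((x :: t).count k : Nat) : Int)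
        = ((t.count k : Nat) : Int) + if k = x then 1 else 0 := by
      intro k; rw [List.count_cons]; by_cases h : k = x
      · simp [h]
      · simp [h, Ne.symm h]
    have hsplit : ∑ k ∈ insert x t.toFinset, (((x :: t).count k : Nat) : Int) * ((b.count k : Nat) : Int)
        = (∑ k ∈ insert x t.toFinset, ((t.count k : Nat) : Int) * ((b.count k : Nat) : Int))
          + ∑ k ∈ insert x t.toFinset, (if k = x then ((b.count k : Nat) : Int) else 0) := by
      rw [← Finset.sum_add_distrib]
      refine Finset.sum_congr rfl (fun k _ => ?_)
      rw [hcnt k]; by_cases h : k = x <;> simp [h] <;> ring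
    rw [hsplit, Finset.sum_ite_eq' (insert x t.toFinset) x]
    simp only [Finset.mem_insert_self, if_pos]
    by_cases hx : x ∈ t.toFinset
    · rw [Finset.insert_eq_self.mpr hx]; ring
    · rw [Finset.sum_insert hx]
      have : t.count x = 0 := List.count_eq_zero.mpr (by simpa using hx)
      rw [this]; push_cast; ring

-- B's counter product equals the flat pair-count sum
lemma pv_pairCount_eq (a b : List Int) :
    pvPairCount a b = (a.map (fun pv => ((b.count pv : Nat) : Int))).sum := by
  have hca : pvCounterB a = PySem.Dict.counter a :=
    PySem.Dict.foldl_insert_getD_add_one_eq_counter a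
  have hcb : pvCounterB b = PySem.Dict.counter b :=
    PySem.Dict.foldl_insert_getD_add_one_eq_counter b
  rw [pvPairCount, hca, hcb, pv_sum_counts]
  rw [PySem.Dict.items_counter, List.map_map]
  have hnd : (PySem.Set.ofList a).Nodup := PySem.Set.nodup_ofList a
  have hfs : (PySem.Set.ofList a).toFinset = a.toFinset := by
    ext k; simp [PySem.Set.mem_ofList]
  rw [← List.sum_toFinset _ hnd, hfs]
  refine Finset.sum_congr rfl (fun k _ => ?_)
  simp [PySem.Dict.getD_counter]

lemma pv_countP_beq (l : List Int) (pv : Int) :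
    l.countP (fun rv => pv == rv) = l.count pv := by
  rw [List.count_eq_countP]
  refine List.countP_congr (fun a _ => ?_)
  by_cases h : pv = a
  · simp [h]
  · simp [h, Ne.symm h]

-- A's double loop = B's counter product, on the (K+1)-prefixes
lemma pv_count_eq_pair (K : Nat) (p r : List Int) :
    pvCountA (K : Int) p r = pvPairCount (p.take (K + 1)) (r.take (K + 1)) := by
  rw [pvCountA, pv_countA_eq (K : Int) p r 0 0, pv_pairCount_eq]
  have h1 : ((K : Int) - 0 + 1).toNat = K + 1 := by omega
  have h2 : ((K : Int) + 1).toNat = K + 1 := by omega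
  rw [h1, h2, zero_add]
  refine congrArg _ (List.map_congr_left (fun pv _ => ?_))
  rw [pv_countP_beq]

set_option maxHeartbeats 2000000 in
lemma pv_row_eq (p r : List Int) (h : pvRowOK p r = true) : pvRowA p r = pvRowB p r := by
  match p, r with
  | [], r => simp [pvRowOK] at h
  | a :: p', [] => simp [pvRowOK] at h
  | a :: p', b :: r' =>
    have hc3 : pvCountA 2 (a::p') (b::r') = pvPairCount ((a::p').take 3) ((b::r').take 3) := by
      exact_mod_cast pv_count_eq_pair 2 (a::p') (b::r')
    have hc2 : pvCountA 1 (a::p') (b::r') = pvPairCount ((a::p').take 2) ((b::r').take 2) := by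
      exact_mod_cast pv_count_eq_pair 1 (a::p') (b::r')
    simp only [pvRowOK, List.isEmpty_cons, List.getD_cons_zero, Bool.not_false, Bool.true_and,
      bne_iff_ne, ne_eq, Bool.or_eq_true, Bool.and_eq_true, decide_eq_true_eq,
      List.getD_cons_succ] at h
    by_cases hab : a = b
    · subst hab
      have h' := h.resolve_left (by simp)
      obtain ⟨⟨hp2, hr2⟩, h''⟩ := h'
      obtain ⟨c, p'', rfl⟩ : ∃ c p'', p' = c :: p'' := by
        cases p' with
        | nil => simp at hp2
        | cons c p'' => exact ⟨c, p'', rfl⟩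
      obtain ⟨d, r'', rfl⟩ : ∃ d r'', r' = d :: r'' := by
        cases r' with
        | nil => simp at hr2
        | cons d r'' => exact ⟨d, r'', rfl⟩
      simp only [List.getD_cons_zero] at h''
      by_cases hcd : c = d
      · subst hcd
        have h3 := h''.resolve_left (by simp)
        obtain ⟨e, p''', rfl⟩ : ∃ e p''', p'' = e :: p''' := by
          cases p'' with
          | nil => simp at h3
          | cons e p''' => exact ⟨e, p''', rfl⟩
        obtain ⟨f, r''', rfl⟩ : ∃ f r''', r'' = f :: r''' := by
          cases r'' with
          | nil => simp at h3
          | cons f r''' => exact ⟨f, r''', rfl⟩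
        simp only [pvRowA, pvRowB, List.cons.injEq]
        refine ⟨?_, ?_, ?_, ?_, trivial, ?_, ?_, trivial⟩
        · simp only [Nat.ofNat_nonneg, Int.one_nonneg, Int.toNat_one, and_true, PySem.List.slice_to, Int.reduceToNat, PySem.List.pyGetD_ofNat', List.getD_eq_getElem?_getD, List.length_cons, lt_add_iff_pos_left, Order.lt_add_one_iff, zero_le, getElem?_pos, List.getElem_cons_succ, List.getElem_cons_zero, Option.getD_some, List.take_succ_cons, List.take_zero, List.cons.injEq]; try exact if_congr (by tauto) rfl rfl
        · simp only [Nat.ofNat_nonneg, Int.one_nonneg, Int.toNat_one, and_true, PySem.List.slice_to, Int.reduceToNat, PySem.List.pyGetD_ofNat', List.getD_eq_getElem?_getD, List.length_cons, lt_add_iff_pos_left, Order.lt_add_one_iff, zero_le, getElem?_pos, List.getElem_cons_succ, List.getElem_cons_zero, Option.getD_some, List.take_succ_cons, List.take_zero, List.cons.injEq, hc3]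
        · simp only [Nat.ofNat_nonneg, Int.one_nonneg, Int.toNat_one, and_true, PySem.List.slice_to, Int.reduceToNat, PySem.List.pyGetD_ofNat', List.getD_eq_getElem?_getD, List.length_cons, lt_add_iff_pos_left, Order.lt_add_one_iff, zero_le, getElem?_pos, List.getElem_cons_succ, List.getElem_cons_zero, Option.getD_some, List.take_succ_cons, List.take_zero, List.cons.injEq]; try exact if_congr (by tauto) rfl rfl
        · simp only [Nat.ofNat_nonneg, Int.one_nonneg, Int.toNat_one, and_true, PySem.List.slice_to, Int.reduceToNat, PySem.List.pyGetD_ofNat', List.getD_eq_getElem?_getD, List.length_cons, lt_add_iff_pos_left, Order.lt_add_one_iff, zero_le, getElem?_pos, List.getElem_cons_succ, List.getElem_cons_zero, Option.getD_some, List.take_succ_cons, List.take_zero, List.cons.injEq, hc2]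
        · simp only [Nat.ofNat_nonneg, Int.one_nonneg, Int.toNat_one, and_true, PySem.List.slice_to, Int.reduceToNat, PySem.List.pyGetD_ofNat', List.getD_eq_getElem?_getD, List.length_cons, lt_add_iff_pos_left, Order.lt_add_one_iff, zero_le, getElem?_pos, List.getElem_cons_succ, List.getElem_cons_zero, Option.getD_some, List.take_succ_cons, List.take_zero, List.cons.injEq]; try exact if_congr (by tauto) rfl rfl
        · rw [ite_self]
      · simp only [pvRowA, pvRowB, List.cons.injEq]
        refine ⟨?_, ?_, ?_, ?_, trivial, ?_, ?_, trivial⟩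
        · simp only [Nat.ofNat_nonneg, Int.one_nonneg, Int.toNat_one, and_true, PySem.List.slice_to, Int.reduceToNat, PySem.List.pyGetD_ofNat', List.getD_eq_getElem?_getD, List.length_cons, lt_add_iff_pos_left, Order.lt_add_one_iff, zero_le, getElem?_pos, List.getElem_cons_succ, List.getElem_cons_zero, Option.getD_some, List.take_succ_cons, List.take_zero, List.cons.injEq]; try exact if_congr (by tauto) rfl rfl
        · simp only [Nat.ofNat_nonneg, Int.one_nonneg, Int.toNat_one, and_true, PySem.List.slice_to, Int.reduceToNat, PySem.List.pyGetD_ofNat', List.getD_eq_getElem?_getD, List.length_cons, lt_add_iff_pos_left, Order.lt_add_one_iff, zero_le, getElem?_pos, List.getElem_cons_succ, List.getElem_cons_zero, Option.getD_some, List.take_succ_cons, List.take_zero, List.cons.injEq, hc3]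
        · simp only [Nat.ofNat_nonneg, Int.one_nonneg, Int.toNat_one, and_true, PySem.List.slice_to, Int.reduceToNat, PySem.List.pyGetD_ofNat', List.getD_eq_getElem?_getD, List.length_cons, lt_add_iff_pos_left, Order.lt_add_one_iff, zero_le, getElem?_pos, List.getElem_cons_succ, List.getElem_cons_zero, Option.getD_some, List.take_succ_cons, List.take_zero, List.cons.injEq]; try exact if_congr (by tauto) rfl rfl
        · simp only [Nat.ofNat_nonneg, Int.one_nonneg, Int.toNat_one, and_true, PySem.List.slice_to, Int.reduceToNat, PySem.List.pyGetD_ofNat', List.getD_eq_getElem?_getD, List.length_cons, lt_add_iff_pos_left, Order.lt_add_one_iff, zero_le, getElem?_pos, List.getElem_cons_succ, List.getElem_cons_zero, Option.getD_some, List.take_succ_cons, List.take_zero, List.cons.injEq, hc2]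
        · simp only [Nat.ofNat_nonneg, Int.one_nonneg, Int.toNat_one, and_true, PySem.List.slice_to, Int.reduceToNat, PySem.List.pyGetD_ofNat', List.getD_eq_getElem?_getD, List.length_cons, lt_add_iff_pos_left, Order.lt_add_one_iff, zero_le, getElem?_pos, List.getElem_cons_succ, List.getElem_cons_zero, Option.getD_some, List.take_succ_cons, List.take_zero, List.cons.injEq]; try exact if_congr (by tauto) rfl rfl
        · rw [ite_self]
    · simp only [pvRowA, pvRowB, List.cons.injEq]
      refine ⟨?_, ?_, ?_, ?_, trivial, ?_, ?_, trivial⟩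
      · simp only [Nat.ofNat_nonneg, Int.one_nonneg, Int.toNat_one, and_true, PySem.List.slice_to, Int.reduceToNat, PySem.List.pyGetD_ofNat', List.getD_eq_getElem?_getD, List.length_cons, lt_add_iff_pos_left, Order.lt_add_one_iff, zero_le, getElem?_pos, List.getElem_cons_succ, List.getElem_cons_zero, Option.getD_some, List.take_succ_cons, List.take_zero, List.cons.injEq]; try exact if_congr (by tauto) rfl rfl
      · simp only [Nat.ofNat_nonneg, Int.one_nonneg, Int.toNat_one, and_true, PySem.List.slice_to, Int.reduceToNat, PySem.List.pyGetD_ofNat', List.getD_eq_getElem?_getD, List.length_cons, lt_add_iff_pos_left, Order.lt_add_one_iff, zero_le, getElem?_pos, List.getElem_cons_succ, List.getElem_cons_zero, Option.getD_some, List.take_succ_cons, List.take_zero, List.cons.injEq, hc3]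
      · simp only [Nat.ofNat_nonneg, Int.one_nonneg, Int.toNat_one, and_true, PySem.List.slice_to, Int.reduceToNat, PySem.List.pyGetD_ofNat', List.getD_eq_getElem?_getD, List.length_cons, lt_add_iff_pos_left, Order.lt_add_one_iff, zero_le, getElem?_pos, List.getElem_cons_succ, List.getElem_cons_zero, Option.getD_some, List.take_succ_cons, List.take_zero, List.cons.injEq]; try exact if_congr (by tauto) rfl rfl
      · simp only [Nat.ofNat_nonneg, Int.one_nonneg, Int.toNat_one, and_true, PySem.List.slice_to, Int.reduceToNat, PySem.List.pyGetD_ofNat', List.getD_eq_getElem?_getD, List.length_cons, lt_add_iff_pos_left, Order.lt_add_one_iff, zero_le, getElem?_pos, List.getElem_cons_succ, List.getElem_cons_zero, Option.getD_some, List.take_succ_cons, List.take_zero, List.cons.injEq, hc2]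
      · simp only [Nat.ofNat_nonneg, Int.one_nonneg, Int.toNat_one, and_true, PySem.List.slice_to, Int.reduceToNat, PySem.List.pyGetD_ofNat', List.getD_eq_getElem?_getD, List.length_cons, lt_add_iff_pos_left, Order.lt_add_one_iff, zero_le, getElem?_pos, List.getElem_cons_succ, List.getElem_cons_zero, Option.getD_some, List.take_succ_cons, List.take_zero, List.cons.injEq]; try exact if_congr (by tauto) rfl rfl
      · rw [ite_self]

-- ===== VERDICT (by name: the statement is the Claim_ definition above) =====
theorem ranck_check_spec : Claim_equal_ranck_check := by
  intro predict real _ hpre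
  unfold Spec_ranck_check ranck_check ranck_check_alt
  exact List.map_congr_left (fun pr hmem => pv_row_eq pr.1 pr.2 (hpre pr hmem))
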